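-- pv_equiv track=rewrite | github.com/paiml/depyler | examples/hard_numeric_trapezoid.py | trapezoid_quadratic
-- ===== SOURCE A (Python) =====
-- def eval_quadratic(a: int, b: int, c: int, x: int) -> int:
--     """Evaluate a*x^2 + b*x + c."""
--     return a * x * x + b * x + c
--
-- def trapezoid_quadratic(a: int, b: int, c: int, x0: int, x1: int, n: int) -> int:
--     """Trapezoidal integration of a*x^2 + b*x + c from x0 to x1 with n steps.
--     All values scaled by 1000. Returns area * 1000."""
--     if n <= 0:
--         return 0
--     h: int = (x1 - x0) // n
--     if h == 0:
--         return 0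
--     total: int = eval_quadratic(a, b, c, x0) + eval_quadratic(a, b, c, x1)
--     i: int = 1
--     while i < n:
--         xi: int = x0 + i * h
--         total = total + 2 * eval_quadratic(a, b, c, xi)
--         i = i + 1
--     return (total * h) // 2
-- ===== SOURCE B (Python) =====
-- def trapezoid_quadratic(a: int, b: int, c: int, x0: int, x1: int, n: int) -> int:
--     """Closed-form trapezoid sum: interior sums of x and x^2 via Sum(i) and Sum(i^2) formulas, O(1)."""
--     if n <= 0:
--         return 0
--     h = (x1 - x0) // n
--     if h == 0:
--         return 0
--     m = n - 1
--     p = m * (m + 1)              # 2 * sum_{i=1..m} i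
--     q = p * (2 * m + 1) // 3     # 2 * sum_{i=1..m} i^2  (exact division)
--     sum_x_twice = 2 * m * x0 + h * p                       # 2 * sum of interior x_i
--     sum_x2_twice = 2 * m * x0 * x0 + 2 * x0 * h * p + h * h * q  # 2 * sum of interior x_i^2
--     total = (a * x0 * x0 + b * x0 + c) + (a * x1 * x1 + b * x1 + c) \
--             + a * sum_x2_twice + b * sum_x_twice + 2 * c * m
--     return (total * h) // 2
-- ===== Notes on version B (the rewrite author's own statement) =====
-- stated objective: faster
-- what changed: Replaced the O(n) while-loop summing the quadratic at each interior point by closed-form sums of i and i^2 (Faulhaber formulas), computing the same trapezoid total in O(1).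
import Mathlib
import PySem

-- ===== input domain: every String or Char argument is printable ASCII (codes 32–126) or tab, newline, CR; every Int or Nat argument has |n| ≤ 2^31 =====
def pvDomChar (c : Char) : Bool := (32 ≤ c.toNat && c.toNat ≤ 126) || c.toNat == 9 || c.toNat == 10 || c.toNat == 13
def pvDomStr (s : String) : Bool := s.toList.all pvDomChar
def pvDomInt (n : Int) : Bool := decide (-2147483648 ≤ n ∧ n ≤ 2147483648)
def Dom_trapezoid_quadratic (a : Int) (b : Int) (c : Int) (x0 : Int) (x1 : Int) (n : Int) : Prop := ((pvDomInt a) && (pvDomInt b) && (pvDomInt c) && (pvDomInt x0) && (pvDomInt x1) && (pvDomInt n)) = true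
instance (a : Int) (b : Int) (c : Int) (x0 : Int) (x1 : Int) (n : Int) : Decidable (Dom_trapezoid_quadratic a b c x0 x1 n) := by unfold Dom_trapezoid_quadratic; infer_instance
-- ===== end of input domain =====

-- B replaces A's O(n) while-loop over the interior points by closed-form Σi / Σi² formulas (O(1)).

-- ===== PORT A =====
def eval_quadratic (a : Int) (b : Int) (c : Int) (x : Int) : Int :=
  a * x * x + b * x + c

-- the while-loop 'while i < n': for n ≥ 1 it runs exactly (n-1) times, i = 1,2,…,n-1
def trapLoop (a : Int) (b : Int) (c : Int) (x0 : Int) (h : Int) : Nat → Int → Int → Int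
  | 0, _, total => total
  | k+1, i, total => trapLoop a b c x0 h k (i + 1) (total + 2 * eval_quadratic a b c (x0 + i * h))

def trapezoid_quadratic (a : Int) (b : Int) (c : Int) (x0 : Int) (x1 : Int) (n : Int) : Int :=
  if n ≤ 0 then 0
  else
    let h := PySem.Int.floordiv (x1 - x0) n
    if h = 0 then 0
    else
      let total := eval_quadratic a b c x0 + eval_quadratic a b c x1
      PySem.Int.floordiv ((trapLoop a b c x0 h (n - 1).toNat 1 total) * h) 2

-- ===== PORT B =====
def trapezoid_quadratic_alt (a : Int) (b : Int) (c : Int) (x0 : Int) (x1 : Int) (n : Int) : Int :=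
  if n ≤ 0 then 0
  else
    let h := PySem.Int.floordiv (x1 - x0) n
    if h = 0 then 0
    else
      let m := n - 1
      let p := m * (m + 1)
      let q := PySem.Int.floordiv (p * (2 * m + 1)) 3
      let sum_x_twice := 2 * m * x0 + h * p
      let sum_x2_twice := 2 * m * x0 * x0 + 2 * x0 * h * p + h * h * q
      let total := (a * x0 * x0 + b * x0 + c) + (a * x1 * x1 + b * x1 + c)
        + a * sum_x2_twice + b * sum_x_twice + 2 * c * m
      PySem.Int.floordiv (total * h) 2

-- ===== PRECONDITION & SPEC =====
def Spec_trapezoid_quadratic (a : Int) (b : Int) (c : Int) (x0 : Int) (x1 : Int) (n : Int) (out : Int) : Prop := out = trapezoid_quadratic_alt a b c x0 x1 n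
instance (a : Int) (b : Int) (c : Int) (x0 : Int) (x1 : Int) (n : Int) (out : Int) : Decidable (Spec_trapezoid_quadratic a b c x0 x1 n out) := by unfold Spec_trapezoid_quadratic; infer_instance

-- ===== CLAIM (what is proved, stated in full; the proofs are below) =====
def Claim_equal_trapezoid_quadratic : Prop := ∀ (a : Int) (b : Int) (c : Int) (x0 : Int) (x1 : Int) (n : Int), Dom_trapezoid_quadratic a b c x0 x1 n → Spec_trapezoid_quadratic a b c x0 x1 n (trapezoid_quadratic a b c x0 x1 n)

-- ===== LEMMAS AND PROOFS =====

-- loop characterisation: 6 * (loop result) as a polynomial in the fuel k and start index i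
lemma trapLoop_six (a b c x0 h : Int) :
    ∀ (k : Nat) (i total : Int),
      6 * trapLoop a b c x0 h k i total =
        6 * total
        + 12 * a * (k : Int) * x0 * x0
        + 12 * a * x0 * h * (2 * (k : Int) * i + (k : Int) * ((k : Int) - 1))
        + 2 * a * h * h * (6 * (k : Int) * i * i + 6 * i * (k : Int) * ((k : Int) - 1)
            + ((k : Int) - 1) * (k : Int) * (2 * (k : Int) - 1))
        + 12 * b * (k : Int) * x0
        + 6 * b * h * (2 * (k : Int) * i + (k : Int) * ((k : Int) - 1))
        + 12 * c * (k : Int) := by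
  intro k
  induction k with
  | zero => intro i total; simp [trapLoop]
  | succ k ih =>
    intro i total
    rw [trapLoop, ih]
    push_cast
    unfold eval_quadratic
    ring

lemma three_dvd (m : Int) : (3 : Int) ∣ m * (m + 1) * (2 * m + 1) := by
  rcases (by omega : m % 3 = 0 ∨ m % 3 = 1 ∨ m % 3 = 2) with h | h | h
  · exact Dvd.dvd.mul_right (Dvd.dvd.mul_right (Int.dvd_of_emod_eq_zero h) _) _
  · exact Dvd.dvd.mul_left (Int.dvd_of_emod_eq_zero (by omega)) _
  · exact Dvd.dvd.mul_right (Dvd.dvd.mul_left (Int.dvd_of_emod_eq_zero (by omega)) _) _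

-- ===== VERDICT (by name: the statement is the Claim_ definition above) =====
theorem trapezoid_quadratic_spec : Claim_equal_trapezoid_quadratic := by
  intro a b c x0 x1 n _
  unfold Spec_trapezoid_quadratic trapezoid_quadratic trapezoid_quadratic_alt
  by_cases hn : n ≤ 0
  · simp [hn]
  · simp only [hn, if_false]
    set h := PySem.Int.floordiv (x1 - x0) n with hh
    by_cases hz : h = 0
    · simp [hz]
    · simp only [hz, if_false]
      congr 1
      -- totals are equal; cancel the factor 6
      set m : Int := n - 1 with hm
      have hk : ((n - 1).toNat : Int) = m := by omega
      have hq : 3 * PySem.Int.floordiv (m * (m + 1) * (2 * m + 1)) 3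
          = m * (m + 1) * (2 * m + 1) := by
        rw [PySem.Int.floordiv_eq_ediv_of_pos (by norm_num)]
        exact Int.mul_ediv_cancel' (three_dvd m)
      apply mul_left_cancel₀ (a := (6 : Int)) (by norm_num)
      rw [show (6 : Int) * ((trapLoop a b c x0 h (n - 1).toNat 1
            (eval_quadratic a b c x0 + eval_quadratic a b c x1)) * h)
          = (6 * trapLoop a b c x0 h (n - 1).toNat 1
            (eval_quadratic a b c x0 + eval_quadratic a b c x1)) * h by ring,
        trapLoop_six, hk]
      unfold eval_quadratic
      linear_combination (-(2*a*h*h*h)) * hq
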